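-- pv_equiv track=rewrite | github.com/mdshoaib04/smart-fixer | code_runner.py | _detect_html
-- ===== SOURCE A (Python) =====
-- def _detect_html(code):
--     """Detect if code is HTML - render in iframe, DO NOT send to runner"""
--     s = code.strip()
--     if not s:
--         return False
--     lower = s.lower()
--     # If code starts with <!DOCTYPE or <html: render directly, never run
--     if lower.startswith('<!doctype') or lower.startswith('<html'):
--         return True
--     # Broader check for other HTML indicators in first 200 chars
--     html_indicators = [
--         '<!doctype html>', '<html', '<head', '<body', '<div', '<span',
--         '<h1', '<h2', '<h3', '<p>', '<script', '<style', '<link',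
--         '<?xml', '<svg', '<canvas', '<meta', '<title'
--     ]
--     return any(lower.startswith(ind) or lower[:200].find(ind) >= 0 for ind in html_indicators)
-- ===== SOURCE B (Python) =====
-- _TAG_SUFFIXES = tuple(
--     '!doctype html>,html,head,body,div,span,h1,h2,h3,p>,'
--     'script,style,link,?xml,svg,canvas,meta,title'.split(',')
-- )
--
--
-- def _detect_html(code):
--     """Detect if code is HTML - render in iframe, DO NOT send to runner"""
--     s = code.strip()
--     if not s:
--         return False
--     lower = s.lower()
--     if lower.startswith('<!doctype'):
--         return True
--     # scan the 200-char window once: a tag can only begin at a '<', so at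
--     # each tag-opening position check the text after it against the tag-name suffixes
--     window = lower[:200]
--     while window:
--         if window[0] == '<' and window[1:].startswith(_TAG_SUFFIXES):
--             return True
--         window = window[1:]
--     return False
-- ===== Notes on version B (the rewrite author's own statement) =====
-- stated objective: alternative
-- what changed: B replaces A's 18 independent substring searches (one full find over the 200-char window per indicator, plus redundant startswith/html-prefix branches) by a single pop-the-head scan of the window that only at tag-opening positions matches the text after it against the 17 tag-name suffixes (kept as one comma-joined string split once).
import Mathlib
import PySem

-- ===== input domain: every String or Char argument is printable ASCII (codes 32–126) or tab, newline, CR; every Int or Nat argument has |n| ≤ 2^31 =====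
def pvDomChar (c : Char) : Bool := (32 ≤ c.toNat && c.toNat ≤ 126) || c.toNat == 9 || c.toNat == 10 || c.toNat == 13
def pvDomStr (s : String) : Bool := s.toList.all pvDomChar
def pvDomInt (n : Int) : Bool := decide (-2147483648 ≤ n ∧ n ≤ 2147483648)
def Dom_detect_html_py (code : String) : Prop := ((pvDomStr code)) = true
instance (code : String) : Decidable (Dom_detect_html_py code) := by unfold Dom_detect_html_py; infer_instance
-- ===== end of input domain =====

-- B scans the 200-char window once and, only at tag-opening positions, matches the text after them
-- against the tag-name suffixes, instead of A's one full substring search per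
-- indicator: alternative algorithm, same result.

-- ===== PORT A =====
def htmlIndicatorsA : List (List Char) :=
  ["<!doctype html>".toList, "<html".toList, "<head".toList, "<body".toList, "<div".toList,
   "<span".toList, "<h1".toList, "<h2".toList, "<h3".toList, "<p>".toList, "<script".toList,
   "<style".toList, "<link".toList, "<?xml".toList, "<svg".toList, "<canvas".toList,
   "<meta".toList, "<title".toList]

def detect_html_py (code : String) : Bool :=
  let s := PySem.Chars.strip code.toList
  if s = [] then false
  else
    let lower := PySem.Chars.lower s
    if PySem.Chars.startswith lower "<!doctype".toList || PySem.Chars.startswith lower "<html".toList then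
      true
    else
      htmlIndicatorsA.any (fun ind =>
        PySem.Chars.startswith lower ind ||
          decide (0 ≤ PySem.Chars.find (PySem.Chars.slice lower none (some 200)) ind))

-- ===== PORT B =====
-- the comma-joined tag-suffix string of Source B, split once at ','
def tagSuffixes : List (List Char) :=
  PySem.Chars.splitOn
    "!doctype html>,html,head,body,div,span,h1,h2,h3,p>,script,style,link,?xml,svg,canvas,meta,title".toList
    [',']

-- the while-loop of Source B: pop the head until a match is found
def tagScan : List Char → Bool
  | [] => false
  | c :: rest =>
      if c == '<' && tagSuffixes.any (fun suf => PySem.Chars.startswith rest suf) then true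
      else tagScan rest

def detect_html_py_alt (code : String) : Bool :=
  let s := PySem.Chars.strip code.toList
  if s = [] then false
  else
    let lower := PySem.Chars.lower s
    if PySem.Chars.startswith lower "<!doctype".toList then true
    else tagScan (PySem.Chars.slice lower none (some 200))

-- ===== PRECONDITION & SPEC =====
def Spec_detect_html_py (code : String) (out : Bool) : Prop := out = detect_html_py_alt code
instance (code : String) (out : Bool) : Decidable (Spec_detect_html_py code out) := by unfold Spec_detect_html_py; infer_instance

-- ===== CLAIM (what is proved, stated in full; the proofs are below) =====
def Claim_equal_detect_html_py : Prop := ∀ (code : String), Dom_detect_html_py code → Spec_detect_html_py code (detect_html_py code)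

-- ===== LEMMAS AND PROOFS =====

-- A's indicator list is exactly '<' prepended to each of B's tag suffixes
lemma indicatorsA_eq : htmlIndicatorsA = tagSuffixes.map (fun suf => '<' :: suf) := by decide

-- every indicator has length ≤ 200 (i.e. every suffix ≤ 199)
lemma suffixes_len : ∀ suf ∈ tagSuffixes, suf.length + 1 ≤ 200 := by decide

lemma html_mem : "html".toList ∈ tagSuffixes := by decide

-- tagScan finds exactly the windows containing '<' + some suffix as an infix
lemma tagScan_iff (w : List Char) :
    tagScan w = true ↔ ∃ suf ∈ tagSuffixes, ('<' :: suf) <:+: w := by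
  induction w with
  | nil =>
      simp only [tagScan, Bool.false_eq_true, false_iff]
      rintro ⟨suf, -, hinf⟩
      simpa using List.infix_nil.mp hinf
  | cons c rest ih =>
      constructor
      · intro h
        simp only [tagScan] at h
        split_ifs at h with hc
        · simp only [Bool.and_eq_true, beq_iff_eq, List.any_eq_true,
            PySem.Chars.startswith_iff] at hc
          obtain ⟨rfl, suf, hm, hp⟩ := hc
          exact ⟨suf, hm, (List.cons_prefix_cons.mpr ⟨rfl, hp⟩).isInfix⟩
        · obtain ⟨suf, hm, hinf⟩ := ih.mp h
          exact ⟨suf, hm, hinf.trans (List.suffix_cons c rest).isInfix⟩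
      · rintro ⟨suf, hm, hinf⟩
        simp only [tagScan]
        rcases List.infix_cons_iff.mp hinf with hp | hinf'
        · obtain ⟨u, hu⟩ := hp
          injection hu with h1 h2
          rw [if_pos]
          simp only [Bool.and_eq_true, beq_iff_eq, List.any_eq_true,
            PySem.Chars.startswith_iff]
          exact ⟨h1.symm, suf, hm, ⟨u, h2⟩⟩
        · have := ih.mpr ⟨suf, hm, hinf'⟩
          split_ifs <;> simp [this]
  -- a prefix of ls whose length is ≤ 200 is an infix of the 200-char window

lemma prefix_infix_window {ind ls : List Char} (hp : ind <+: ls) (hl : ind.length ≤ 200) :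
    ind <:+: ls.take 200 :=
  (List.prefix_take_iff.mpr ⟨hp, hl⟩).isInfix

-- the two branch bodies agree for any lowered string
lemma branch_eq (ls : List Char) :
    (if PySem.Chars.startswith ls "<!doctype".toList || PySem.Chars.startswith ls "<html".toList then
      true
    else
      htmlIndicatorsA.any (fun ind =>
        PySem.Chars.startswith ls ind ||
          decide (0 ≤ PySem.Chars.find (PySem.Chars.slice ls none (some 200)) ind)))
    = (if PySem.Chars.startswith ls "<!doctype".toList then true
       else tagScan (PySem.Chars.slice ls none (some 200))) := by
  have hw : PySem.Chars.slice ls none (some 200) = ls.take 200 := by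
    simp [PySem.Chars.slice_eq_listSlice, PySem.List.slice_to]
  cases hdt : PySem.Chars.startswith ls "<!doctype".toList with
  | true => simp
  | false =>
      cases hh : PySem.Chars.startswith ls "<html".toList with
      | true =>
          simp only [Bool.or_true, if_true, Bool.false_eq_true, if_false, hw]
          symm
          rw [tagScan_iff]
          exact ⟨_, html_mem,
            prefix_infix_window ((PySem.Chars.startswith_iff _ _).mp hh) (by decide)⟩
      | false =>
          simp only [Bool.or_false, Bool.false_eq_true, if_false, hw, indicatorsA_eq]
          rw [Bool.eq_iff_iff]
          simp only [List.any_eq_true, List.mem_map, Bool.or_eq_true, decide_eq_true_eq,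
            PySem.Chars.startswith_iff, PySem.Chars.find_nonneg_iff, tagScan_iff]
          constructor
          · rintro ⟨ind, ⟨suf, hm, rfl⟩, hp | hinf⟩
            · exact ⟨suf, hm, prefix_infix_window hp (by simpa using suffixes_len suf hm)⟩
            · exact ⟨suf, hm, by simpa [hw] using hinf⟩
          · rintro ⟨suf, hm, hinf⟩
            exact ⟨'<' :: suf, ⟨suf, hm, rfl⟩, Or.inr (by simpa [hw] using hinf)⟩

-- ===== VERDICT (by name: the statement is the Claim_ definition above) =====
theorem detect_html_py_spec : Claim_equal_detect_html_py := by
  intro code _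
  unfold Spec_detect_html_py detect_html_py detect_html_py_alt
  by_cases hse : PySem.Chars.strip code.toList = []
  · simp [hse]
  · simp only [if_neg hse]
    exact branch_eq _
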